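-- pv_equiv track=rewrite | github.com/Tanser2024/Tanser-s_study_data | practice6/A. 贪婪的竞技场.py | most_coins
-- ===== SOURCE A (Python) =====
-- def most_coins(n,coins):
--     if n==0:
--         return coins
--     if n==1:
--         return coins+1
--     if n%2==0:
--         if n%4==0 and n>4:
--             return most_coins(n-2,coins+1)
--         else:
--             return most_coins(n//2-1,coins+n//2)
--     else:
--         if (n-1) % 4 == 0 and (n-1 )> 4:
--             return most_coins(n - 2, coins + 1)
--         else:
--             return most_coins((n-1) // 2, coins + 1)
-- ===== SOURCE B (Python) =====
-- def most_coins(n, coins):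
--     # Iterative with merged steps: A's "n -> n-2" branches are followed one
--     # step later by the halving branch, so both are fused into one update.
--     total = coins
--     while n > 1:
--         if n % 4 == 0 and n > 4:
--             total += n // 2
--             n = n // 2 - 2
--         elif n % 2 == 0:
--             total += n // 2
--             n = n // 2 - 1
--         elif n % 4 == 1 and n > 5:
--             total += 2
--             n = (n - 3) // 2
--         else:
--             total += 1
--             n = (n - 1) // 2
--     return total + n
-- ===== Notes on version B (the rewrite author's own statement) =====
-- stated objective: alternative
-- what changed: Replaced the accumulator-passing recursion by an iterative loop whose four branches each fuse A's 'subtract 2' step with the halving step that always follows it, so every iteration halves n.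
import Mathlib
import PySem

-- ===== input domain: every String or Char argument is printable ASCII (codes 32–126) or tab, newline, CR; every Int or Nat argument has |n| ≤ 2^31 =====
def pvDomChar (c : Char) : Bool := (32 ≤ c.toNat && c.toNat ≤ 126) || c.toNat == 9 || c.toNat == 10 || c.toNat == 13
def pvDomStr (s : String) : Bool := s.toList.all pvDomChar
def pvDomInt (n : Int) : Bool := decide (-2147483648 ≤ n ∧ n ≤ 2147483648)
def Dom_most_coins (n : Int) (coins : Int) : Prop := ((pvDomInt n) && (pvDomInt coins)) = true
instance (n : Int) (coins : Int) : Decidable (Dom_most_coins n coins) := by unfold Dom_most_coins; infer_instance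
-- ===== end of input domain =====

-- B fuses A's 'n-2' branches with the halving step that always follows them into a single loop iteration (alternative decomposition, same cost).
-- A recurses without bound for n < 0 (Pre_ excludes that); B's loop simply never starts there.

-- ===== PORT A =====
-- fuel-guarded transliteration of A's recursion; fuel n.toNat + 1 is enough on Pre_ (n ≥ 0), proved below
def mostCoinsGo : Nat → Int → Int → Int
  | 0, _, coins => coins
  | fuel+1, n, coins =>
    if n = 0 then coins
    else if n = 1 then coins + 1
    else if PySem.Int.mod n 2 = 0 then
      if PySem.Int.mod n 4 = 0 ∧ 4 < n then
        mostCoinsGo fuel (n - 2) (coins + 1)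
      else
        mostCoinsGo fuel (PySem.Int.floordiv n 2 - 1) (coins + PySem.Int.floordiv n 2)
    else
      if PySem.Int.mod (n - 1) 4 = 0 ∧ 4 < n - 1 then
        mostCoinsGo fuel (n - 2) (coins + 1)
      else
        mostCoinsGo fuel (PySem.Int.floordiv (n - 1) 2) (coins + 1)

def most_coins (n : Int) (coins : Int) : Int := mostCoinsGo (n.toNat + 1) n coins

-- ===== PORT B =====
def most_coins_alt (n : Int) (coins : Int) : Int :=
  if h : 1 < n then
    if PySem.Int.mod n 4 = 0 ∧ 4 < n then
      most_coins_alt (PySem.Int.floordiv n 2 - 2) (coins + PySem.Int.floordiv n 2)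
    else if PySem.Int.mod n 2 = 0 then
      most_coins_alt (PySem.Int.floordiv n 2 - 1) (coins + PySem.Int.floordiv n 2)
    else if PySem.Int.mod n 4 = 1 ∧ 5 < n then
      most_coins_alt (PySem.Int.floordiv (n - 3) 2) (coins + 2)
    else
      most_coins_alt (PySem.Int.floordiv (n - 1) 2) (coins + 1)
  else coins + n
termination_by n.toNat
decreasing_by
  all_goals
    simp only [PySem.Int.floordiv_eq_ediv_of_pos (show (0:Int) < 2 by norm_num)]
    omega

-- ===== PRECONDITION & SPEC =====
-- Pre_ excludes n < 0, on which A recurses forever ((n-1)//2 = n there) and raises RecursionError.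
def Pre_most_coins (n : Int) (coins : Int) : Prop := 0 ≤ n
instance (n : Int) (coins : Int) : Decidable (Pre_most_coins n coins) := by unfold Pre_most_coins; infer_instance
def pvWitness_most_coins : Int × Int := (10, 0)

def Spec_most_coins (n : Int) (coins : Int) (out : Int) : Prop := out = most_coins_alt n coins
instance (n : Int) (coins : Int) (out : Int) : Decidable (Spec_most_coins n coins out) := by unfold Spec_most_coins; infer_instance

-- ===== CLAIM (what is proved, stated in full; the proofs are below) =====
def Claim_equal_most_coins : Prop := ∀ (n : Int) (coins : Int), Dom_most_coins n coins → Pre_most_coins n coins → Spec_most_coins n coins (most_coins n coins)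

-- ===== LEMMAS AND PROOFS =====

lemma pv_mod_two (a : Int) : PySem.Int.mod a 2 = a % 2 :=
  PySem.Int.mod_eq_emod_of_pos (by norm_num)
lemma pv_mod_four (a : Int) : PySem.Int.mod a 4 = a % 4 :=
  PySem.Int.mod_eq_emod_of_pos (by norm_num)
lemma pv_fd_two (a : Int) : PySem.Int.floordiv a 2 = a / 2 :=
  PySem.Int.floordiv_eq_ediv_of_pos (by norm_num)

-- unfold B one step
lemma alt_unfold (n coins : Int) :
    most_coins_alt n coins =
      if 1 < n then
        if PySem.Int.mod n 4 = 0 ∧ 4 < n then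
          most_coins_alt (PySem.Int.floordiv n 2 - 2) (coins + PySem.Int.floordiv n 2)
        else if PySem.Int.mod n 2 = 0 then
          most_coins_alt (PySem.Int.floordiv n 2 - 1) (coins + PySem.Int.floordiv n 2)
        else if PySem.Int.mod n 4 = 1 ∧ 5 < n then
          most_coins_alt (PySem.Int.floordiv (n - 3) 2) (coins + 2)
        else
          most_coins_alt (PySem.Int.floordiv (n - 1) 2) (coins + 1)
      else coins + n := by
  rw [most_coins_alt]
  split <;> rfl

-- B absorbs A's even 'n-2' step: one more A-step lands in B's second branch
lemma alt_step_even (n coins : Int) (h4 : n % 4 = 0) (hn : 4 < n) :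
    most_coins_alt (n - 2) (coins + 1) = most_coins_alt n coins := by
  rw [alt_unfold (n - 2), alt_unfold n]
  simp only [pv_mod_two, pv_mod_four, pv_fd_two]
  have h3 : (n - 2) / 2 = n / 2 - 1 := by omega
  rw [if_pos (show (1:Int) < n - 2 by omega),
      if_neg (show ¬((n - 2) % 4 = 0 ∧ 4 < n - 2) by omega),
      if_pos (show (n - 2) % 2 = 0 by omega),
      if_pos (show (1:Int) < n by omega),
      if_pos (⟨h4, hn⟩ : n % 4 = 0 ∧ 4 < n), h3]
  ring_nf

-- B absorbs A's odd 'n-2' step: one more A-step lands in B's fourth branch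
lemma alt_step_odd (n coins : Int) (h4 : (n - 1) % 4 = 0) (hn : 4 < n - 1) (hodd : n % 2 = 1) :
    most_coins_alt (n - 2) (coins + 1) = most_coins_alt n coins := by
  rw [alt_unfold (n - 2), alt_unfold n]
  simp only [pv_mod_two, pv_mod_four, pv_fd_two]
  have h3 : (n - 2 - 1) / 2 = (n - 3) / 2 := by omega
  rw [if_pos (show (1:Int) < n - 2 by omega),
      if_neg (show ¬((n - 2) % 4 = 0 ∧ 4 < n - 2) by omega),
      if_neg (show ¬((n - 2) % 2 = 0) by omega),
      if_neg (show ¬((n - 2) % 4 = 1 ∧ 5 < n - 2) by omega),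
      if_pos (show (1:Int) < n by omega),
      if_neg (show ¬(n % 4 = 0 ∧ 4 < n) by omega),
      if_neg (show ¬(n % 2 = 0) by omega),
      if_pos (show n % 4 = 1 ∧ 5 < n by omega), h3]
  ring_nf

lemma go_eq_alt : ∀ (fuel : Nat) (n coins : Int), 0 ≤ n → n.toNat < fuel →
    mostCoinsGo fuel n coins = most_coins_alt n coins := by
  intro fuel
  induction fuel with
  | zero => intro n coins _ hf; omega
  | succ fuel ih =>
    intro n coins hn hf
    by_cases h0 : n = 0
    · subst h0; simp [mostCoinsGo, alt_unfold]
    by_cases h1 : n = 1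
    · subst h1; simp [mostCoinsGo, alt_unfold]
    have hge : 2 ≤ n := by omega
    by_cases hev : n % 2 = 0
    · by_cases hc : n % 4 = 0 ∧ 4 < n
      · -- A takes the n-2 step; B fused it
        have : mostCoinsGo (fuel+1) n coins = mostCoinsGo fuel (n - 2) (coins + 1) := by
          simp only [mostCoinsGo, pv_mod_two, pv_mod_four]
          rw [if_neg h0, if_neg h1, if_pos hev, if_pos hc]
        rw [this, ih (n - 2) (coins + 1) (by omega) (by omega)]
        exact alt_step_even n coins hc.1 hc.2
      · have : mostCoinsGo (fuel+1) n coins =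
            mostCoinsGo fuel (PySem.Int.floordiv n 2 - 1) (coins + PySem.Int.floordiv n 2) := by
          simp only [mostCoinsGo, pv_mod_two, pv_mod_four]
          rw [if_neg h0, if_neg h1, if_pos hev, if_neg hc]
        rw [this, pv_fd_two,
            ih (n / 2 - 1) (coins + n / 2) (by omega) (by omega),
            alt_unfold n]
        simp only [pv_mod_two, pv_mod_four, pv_fd_two]
        rw [if_pos (by omega), if_neg (by simpa [pv_mod_four] using hc), if_pos hev]
    · by_cases hc : (n - 1) % 4 = 0 ∧ 4 < n - 1
      · have : mostCoinsGo (fuel+1) n coins = mostCoinsGo fuel (n - 2) (coins + 1) := by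
          simp only [mostCoinsGo, pv_mod_two, pv_mod_four]
          rw [if_neg h0, if_neg h1, if_neg hev, if_pos hc]
        rw [this, ih (n - 2) (coins + 1) (by omega) (by omega)]
        exact alt_step_odd n coins hc.1 hc.2 (by omega)
      · have : mostCoinsGo (fuel+1) n coins =
            mostCoinsGo fuel (PySem.Int.floordiv (n - 1) 2) (coins + 1) := by
          simp only [mostCoinsGo, pv_mod_two, pv_mod_four]
          rw [if_neg h0, if_neg h1, if_neg hev, if_neg hc]
        rw [this, pv_fd_two,
            ih ((n - 1) / 2) (coins + 1) (by omega) (by omega),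
            alt_unfold n]
        simp only [pv_mod_two, pv_mod_four, pv_fd_two]
        rw [if_pos (by omega), if_neg (by omega), if_neg (by omega),
            if_neg (show ¬(n % 4 = 1 ∧ 5 < n) by omega)]

-- ===== VERDICT (by name: the statement is the Claim_ definition above) =====
theorem most_coins_spec : Claim_equal_most_coins := by
  intro n coins _ hpre
  unfold Spec_most_coins most_coins
  exact go_eq_alt (n.toNat + 1) n coins hpre (by omega)
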